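-- pv_equiv track=rewrite | github.com/prranges/python_django_piscine | day_01/ex05/all_in.py | find_capital
-- ===== SOURCE A (Python) =====
-- def find_capital(arg):
--
--     states = {
--         "Oregon": "OR",
--         "Alabama": "AL",
--         "New Jersey": "NJ",
--         "Colorado": "CO"
--     }
--     capital_cities = {
--         "OR": "Salem",
--         "AL": "Montgomery",
--         "NJ": "Trenton",
--         "CO": "Denver"
--     }
--
--     if arg in states.keys():
--         return capital_cities.get(states.get(arg)) + ' is the capital of ' + arg
--
--     for key_city, value_city in capital_cities.items():
--         if value_city == arg:
--             for key_state, value_state in states.items():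
--                 if value_state == key_city:
--                     return arg + ' is the capital of ' + key_state
--     return arg + ' is neither a capital city nor a state'
-- ===== SOURCE B (Python) =====
-- def find_capital(arg):
--     pairs = [
--         ("Oregon", "Salem"),
--         ("Alabama", "Montgomery"),
--         ("New Jersey", "Trenton"),
--         ("Colorado", "Denver"),
--     ]
--     # one flat answer table: both a state name and its capital map to the SAME sentence
--     answers = {}
--     for state, capital in pairs:
--         sentence = capital + ' is the capital of ' + state
--         answers[state] = sentence
--         answers[capital] = sentence
--     return answers.get(arg, arg + ' is neither a capital city nor a state')
-- ===== Notes on version B (the rewrite author's own statement) =====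
-- stated objective: simpler
-- what changed: Exploits that both of A's positive branches emit the identical sentence: B precomputes one flat name-to-sentence answer table over (state,capital) pairs and the body is a single dict.get with a default, eliminating all branching and the nested reverse scan.
import Mathlib
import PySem

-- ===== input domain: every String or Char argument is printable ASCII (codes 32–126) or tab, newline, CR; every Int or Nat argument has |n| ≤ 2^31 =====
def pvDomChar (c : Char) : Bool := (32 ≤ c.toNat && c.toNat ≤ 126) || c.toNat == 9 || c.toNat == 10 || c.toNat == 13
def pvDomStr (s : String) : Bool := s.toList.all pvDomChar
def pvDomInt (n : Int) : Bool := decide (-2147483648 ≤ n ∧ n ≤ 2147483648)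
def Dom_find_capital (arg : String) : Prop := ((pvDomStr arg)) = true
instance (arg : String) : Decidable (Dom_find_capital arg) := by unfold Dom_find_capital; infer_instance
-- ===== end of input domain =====

-- B exploits that both of A's positive branches emit the same sentence: it precomputes one flat
-- name->sentence answer table and the body is a single lookup with a default (simpler, no branching).

-- ===== PORT A =====
def pvStatesA : PySem.Dict String String :=
  PySem.Dict.ofList [("Oregon", "OR"), ("Alabama", "AL"), ("New Jersey", "NJ"), ("Colorado", "CO")]

def pvCapsA : PySem.Dict String String :=
  PySem.Dict.ofList [("OR", "Salem"), ("AL", "Montgomery"), ("NJ", "Trenton"), ("CO", "Denver")]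

-- inner 'for key_state, value_state in states.items()' loop
def pvInnerA (arg key_city : String) : List (String × String) → Option String
  | [] => none
  | (key_state, value_state) :: rest =>
      if value_state == key_city then some (arg ++ " is the capital of " ++ key_state)
      else pvInnerA arg key_city rest

-- outer 'for key_city, value_city in capital_cities.items()' loop
def pvOuterA (arg : String) : List (String × String) → Option String
  | [] => none
  | (key_city, value_city) :: rest =>
      if value_city == arg then
        match pvInnerA arg key_city pvStatesA.items with
        | some r => some r
        | none => pvOuterA arg rest
      else pvOuterA arg rest

def find_capital (arg : String) : String :=
  if pvStatesA.contains arg then  -- 'arg in states.keys()' is key membership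
    -- capital_cities.get(states.get(arg)): both lookups succeed under the guard, '.getD ""' is exact here
    ((pvCapsA.get? ((pvStatesA.get? arg).getD "")).getD "") ++ " is the capital of " ++ arg
  else
    match pvOuterA arg pvCapsA.items with
    | some r => r
    | none => arg ++ " is neither a capital city nor a state"

-- ===== PORT B =====
def pvPairsB : List (String × String) :=
  [("Oregon", "Salem"), ("Alabama", "Montgomery"), ("New Jersey", "Trenton"), ("Colorado", "Denver")]

-- 'for state, capital in pairs: answers[state] = sentence; answers[capital] = sentence'
def pvAnswersB : PySem.Dict String String :=
  pvPairsB.foldl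
    (fun d sc =>
      let sentence := sc.2 ++ " is the capital of " ++ sc.1
      (d.insert sc.1 sentence).insert sc.2 sentence)
    PySem.Dict.empty

def find_capital_alt (arg : String) : String :=
  (pvAnswersB.get? arg).getD (arg ++ " is neither a capital city nor a state")

-- ===== PRECONDITION & SPEC =====
def Spec_find_capital (arg : String) (out : String) : Prop := out = find_capital_alt arg
instance (arg : String) (out : String) : Decidable (Spec_find_capital arg out) := by unfold Spec_find_capital; infer_instance

-- ===== CLAIM (what is proved, stated in full; the proofs are below) =====
def Claim_equal_find_capital : Prop := ∀ (arg : String), Dom_find_capital arg → Spec_find_capital arg (find_capital arg)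

-- ===== LEMMAS AND PROOFS =====

lemma pvStatesA_eq : pvStatesA = PySem.Dict.mk [("Oregon", "OR"), ("Alabama", "AL"), ("New Jersey", "NJ"), ("Colorado", "CO")] := by decide
lemma pvCapsA_eq : pvCapsA = PySem.Dict.mk [("OR", "Salem"), ("AL", "Montgomery"), ("NJ", "Trenton"), ("CO", "Denver")] := by decide
lemma pvAnswersB_eq : pvAnswersB = PySem.Dict.mk
    [("Oregon", "Salem is the capital of Oregon"), ("Salem", "Salem is the capital of Oregon"),
     ("Alabama", "Montgomery is the capital of Alabama"), ("Montgomery", "Montgomery is the capital of Alabama"),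
     ("New Jersey", "Trenton is the capital of New Jersey"), ("Trenton", "Trenton is the capital of New Jersey"),
     ("Colorado", "Denver is the capital of Colorado"), ("Denver", "Denver is the capital of Colorado")] := by decide

-- ===== VERDICT (by name: the statement is the Claim_ definition above) =====
theorem find_capital_spec : Claim_equal_find_capital := by
  intro arg _
  unfold Spec_find_capital
  by_cases h1 : arg = "Oregon"; · subst h1; decide
  by_cases h2 : arg = "Alabama"; · subst h2; decide
  by_cases h3 : arg = "New Jersey"; · subst h3; decide
  by_cases h4 : arg = "Colorado"; · subst h4; decide
  by_cases h5 : arg = "Salem"; · subst h5; decide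
  by_cases h6 : arg = "Montgomery"; · subst h6; decide
  by_cases h7 : arg = "Trenton"; · subst h7; decide
  by_cases h8 : arg = "Denver"; · subst h8; decide
  unfold find_capital find_capital_alt
  rw [pvStatesA_eq, pvCapsA_eq, pvAnswersB_eq]
  simp [pvOuterA, PySem.Dict.get?, h1, h2, h3, h4, h5, h6, h7, h8, Ne.symm h1, Ne.symm h2, Ne.symm h3, Ne.symm h4,
    Ne.symm h5, Ne.symm h6, Ne.symm h7, Ne.symm h8]
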